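-- pv_equiv track=rewrite | github.com/gregor-grote/homomesy | homomesy/homomesy.py | is_fubini_ranking
-- ===== SOURCE A (Python) =====
-- def is_fubini_ranking(lst):
--     n = len(lst)
--     for i in range(1, n + 1):
--         count = lst.count(i)
--         for j in range(1, count):
--             if i + j in lst:
--                 return False
--     return True
-- ===== SOURCE B (Python) =====
-- def is_fubini_ranking(lst):
--     n = len(lst)
--     s = sorted(lst)
--     i = 0
--     m = len(s)
--     while i < m:
--         v = s[i]
--         j = i + 1
--         while j < m and s[j] == v:
--             j += 1
--         if 1 <= v <= n and j < m and s[j] < v + (j - i):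
--             return False
--         i = j
--     return True
-- ===== Notes on version B (the rewrite author's own statement) =====
-- stated objective: faster
-- what changed: Instead of scanning 1..n and calling lst.count/membership repeatedly (quadratic-to-cubic), B sorts the list once and makes a single pass over equal-value runs, comparing each run's value+length against the next distinct value.
import Mathlib
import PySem

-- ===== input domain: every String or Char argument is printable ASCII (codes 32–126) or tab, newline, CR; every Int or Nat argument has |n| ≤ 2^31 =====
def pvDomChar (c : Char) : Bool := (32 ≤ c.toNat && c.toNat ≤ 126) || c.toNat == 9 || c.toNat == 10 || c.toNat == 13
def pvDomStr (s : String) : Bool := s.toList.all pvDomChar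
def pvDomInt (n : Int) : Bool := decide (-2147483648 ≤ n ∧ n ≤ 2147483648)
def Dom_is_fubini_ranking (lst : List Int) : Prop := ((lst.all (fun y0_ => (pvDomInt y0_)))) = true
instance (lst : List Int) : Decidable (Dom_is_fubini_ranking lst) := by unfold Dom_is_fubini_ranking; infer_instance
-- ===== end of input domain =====

-- B replaces A's scan of 1..n with repeated count/membership passes by one sort plus a single
-- run-length pass over adjacent equal values.


-- ===== PORT A =====
-- inner loop 'for j in range(1, count): if i + j in lst: return False'
def fubiniA_inner (lst : List Int) (i : Int) : Bool :=
  (PySem.List.pyRange 1 (PySem.List.count lst i) 1).any (fun j => decide ((i + j) ∈ lst))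

-- outer loop 'for i in range(1, n + 1)' with early return False
def fubiniA_loop (lst : List Int) : List Int → Bool
  | [] => true
  | i :: rest => if fubiniA_inner lst i then false else fubiniA_loop lst rest

def is_fubini_ranking (lst : List Int) : Bool :=
  let n : Int := lst.length
  fubiniA_loop lst (PySem.List.pyRange 1 (n + 1) 1)

-- ===== PORT B =====
-- the outer while-loop of Source B: walk the sorted list run by run; the inner while-loop that
-- advances j across the run of v is the takeWhile/dropWhile split of the tail
def fubiniB_loop (n : Int) (s : List Int) : Bool :=
  match s with
  | [] => true
  | v :: rest =>
    let run := rest.takeWhile (fun x => x == v)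
    let rest' := rest.dropWhile (fun x => x == v)
    if decide (1 ≤ v) && decide (v ≤ n) &&
       (match rest' with
        | w :: _ => decide (w < v + (1 + (run.length : Int)))
        | [] => false) then false
    else fubiniB_loop n rest'
termination_by s.length
decreasing_by
  simp only [List.length_cons]
  exact Nat.lt_succ_of_le (List.length_dropWhile_le _ _)

def is_fubini_ranking_alt (lst : List Int) : Bool :=
  let n : Int := lst.length
  fubiniB_loop n (PySem.List.sorted lst (fun x => x) false)

-- ===== PRECONDITION & SPEC =====
def Spec_is_fubini_ranking (lst : List Int) (out : Bool) : Prop := out = is_fubini_ranking_alt lst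
instance (lst : List Int) (out : Bool) : Decidable (Spec_is_fubini_ranking lst out) := by unfold Spec_is_fubini_ranking; infer_instance

-- ===== CLAIM (what is proved, stated in full; the proofs are below) =====
def Claim_equal_is_fubini_ranking : Prop := ∀ (lst : List Int), Dom_is_fubini_ranking lst → Spec_is_fubini_ranking lst (is_fubini_ranking lst)

-- ===== LEMMAS AND PROOFS =====

-- the common characterisation: some value v in 1..n has another member w of the list
-- strictly between v and v + (multiplicity of v)
def FubiniBad (n : Int) (s : List Int) : Prop :=
  ∃ v w : Int, 1 ≤ v ∧ v ≤ n ∧ w ∈ s ∧ v < w ∧ w < v + (s.count v : Int)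

theorem fubiniA_loop_true_iff (lst : List Int) (l : List Int) :
    fubiniA_loop lst l = true ↔ ∀ i ∈ l, fubiniA_inner lst i = false := by
  induction l with
  | nil => simp [fubiniA_loop]
  | cons i rest ih =>
    by_cases h : fubiniA_inner lst i = true
    · simp [fubiniA_loop, h]
    · simp only [Bool.not_eq_true] at h
      simp [fubiniA_loop, h, ih]

theorem fubiniA_inner_true_iff (lst : List Int) (i : Int) :
    fubiniA_inner lst i = true ↔ ∃ j : Int, 1 ≤ j ∧ j < (lst.count i : Int) ∧ (i + j) ∈ lst := by
  simp [fubiniA_inner, List.any_eq_true, PySem.List.mem_pyRange_one, PySem.List.count_eq]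
  constructor
  · rintro ⟨j, ⟨h1, h2⟩, h3⟩; exact ⟨j, h1, h2, h3⟩
  · rintro ⟨j, h1, h2, h3⟩; exact ⟨j, ⟨h1, h2⟩, h3⟩

theorem portA_true_iff (lst : List Int) :
    is_fubini_ranking lst = true ↔ ¬ FubiniBad (lst.length : Int) lst := by
  unfold is_fubini_ranking FubiniBad
  rw [fubiniA_loop_true_iff]
  constructor
  · intro h
    rintro ⟨v, w, h1, h2, hw, h3, h4⟩
    have hv : v ∈ PySem.List.pyRange 1 ((lst.length : Int) + 1) 1 := by
      rw [PySem.List.mem_pyRange_one]; omega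
    have := h v hv
    rw [Bool.eq_false_iff, Ne, fubiniA_inner_true_iff] at this
    exact this ⟨w - v, by omega, by omega, by simpa using hw⟩
  · intro h i hi
    rw [PySem.List.mem_pyRange_one] at hi
    rw [Bool.eq_false_iff, Ne, fubiniA_inner_true_iff]
    rintro ⟨j, h1, h2, h3⟩
    exact h ⟨i, i + j, hi.1, by omega, h3, by omega, by omega⟩

-- one step of B's run decomposition: in sorted v :: rest, the remainder after the run of v is
-- sorted, strictly larger than v, and the run length + 1 is the multiplicity of v
theorem runSplit (v : Int) (rest : List Int) (hs : (v :: rest).Pairwise (· ≤ ·)) :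
    rest = rest.takeWhile (fun x => x == v) ++ rest.dropWhile (fun x => x == v) ∧
    (∀ x ∈ rest.takeWhile (fun x => x == v), x = v) ∧
    (rest.dropWhile (fun x => x == v)).Pairwise (· ≤ ·) ∧
    (∀ x ∈ rest.dropWhile (fun x => x == v), v < x) ∧
    ((v :: rest).count v : Int) = 1 + ((rest.takeWhile (fun x => x == v)).length : Int) := by
  have hsplit : rest = rest.takeWhile (fun x => x == v) ++ rest.dropWhile (fun x => x == v) :=
    (List.takeWhile_append_dropWhile).symm
  have hrun : ∀ x ∈ rest.takeWhile (fun x => x == v), x = v := by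
    intro x hx
    have := List.mem_takeWhile_imp hx
    simpa [beq_iff_eq] using this
  obtain ⟨hle, hpair⟩ := List.pairwise_cons.mp hs
  have hrest' : (rest.dropWhile (fun x => x == v)).Pairwise (· ≤ ·) := by
    conv at hpair => rw [hsplit]
    exact (List.pairwise_append.mp hpair).2.1
  have hgt : ∀ x ∈ rest.dropWhile (fun x => x == v), v < x := by
    cases hd : rest.dropWhile (fun x => x == v) with
    | nil => intro x hx; simp at hx
    | cons w t =>
      have hw : ¬ (w == v) = true := by
        have := List.head?_dropWhile_not (fun x => x == v) rest
        rw [hd] at this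
        simp only [List.head?_cons] at this
        simp [this]
      have hwv : v < w := by
        have hmem : w ∈ rest := by
          rw [hsplit, hd]; exact List.mem_append_right _ (List.mem_cons_self)
        have := hle w hmem
        simp [beq_iff_eq] at hw
        omega
      intro x hx
      rcases List.mem_cons.mp hx with h | h
      · omega
      · have : w ≤ x := by
          have hp : (w :: t).Pairwise (· ≤ ·) := hd ▸ hrest'
          exact (List.pairwise_cons.mp hp).1 x h
        omega
  refine ⟨hsplit, hrun, hrest', hgt, ?_⟩
  have c1 : rest.count v =
      (rest.takeWhile (fun x => x == v)).count v + (rest.dropWhile (fun x => x == v)).count v := by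
    conv_lhs => rw [hsplit]
    exact List.count_append ..
  have c2 : (rest.takeWhile (fun x => x == v)).count v = (rest.takeWhile (fun x => x == v)).length := by
    rw [List.count_eq_length]
    intro b hb
    simp [hrun b hb]
  have c3 : (rest.dropWhile (fun x => x == v)).count v = 0 := by
    rw [List.count_eq_zero]
    intro hmem
    exact absurd (hgt v hmem) (lt_irrefl v)
  rw [List.count_cons_self, c1, c2, c3]
  push_cast
  ring

-- FubiniBad over one run step
theorem fubiniBad_cons (n v : Int) (rest : List Int) (hs : (v :: rest).Pairwise (· ≤ ·)) :
    FubiniBad n (v :: rest) ↔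
      (1 ≤ v ∧ v ≤ n ∧ ∃ w t, rest.dropWhile (fun x => x == v) = w :: t ∧
          w < v + (1 + ((rest.takeWhile (fun x => x == v)).length : Int))) ∨
      FubiniBad n (rest.dropWhile (fun x => x == v)) := by
  obtain ⟨hsplit, hrun, hrest', hgt, hcount⟩ := runSplit v rest hs
  constructor
  · rintro ⟨v', w, h1, h2, hw, h3, h4⟩
    have hwgtv' : v' < w := h3
    by_cases hv : v' = v
    · subst hv
      -- w ∈ v :: rest and w > v', so w is in the remainder
      have hwr : w ∈ rest.dropWhile (fun x => x == v') := by
        rcases List.mem_cons.mp hw with h | h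
        · omega
        · rw [hsplit] at h
          rcases List.mem_append.mp h with h | h
          · have := hrun w h; omega
          · exact h
      cases hd : rest.dropWhile (fun x => x == v') with
      | nil => rw [hd] at hwr; simp at hwr
      | cons w0 t =>
        left
        refine ⟨h1, h2, w0, t, rfl, ?_⟩
        have hw0w : w0 ≤ w := by
          rw [hd] at hwr
          rcases List.mem_cons.mp hwr with h | h
          · omega
          · have hp : (w0 :: t).Pairwise (· ≤ ·) := hd ▸ hrest'
            exact (List.pairwise_cons.mp hp).1 w h
        omega
    · -- v' ≠ v: both v' (implicitly, through its count) and w live in the remainder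
      right
      have hcnt : 1 ≤ ((v :: rest).count v' : Int) := by omega
      have hv'mem : v' ∈ v :: rest := List.count_pos_iff.mp (by exact_mod_cast hcnt)
      have hv'r : v' ∈ rest.dropWhile (fun x => x == v) := by
        rcases List.mem_cons.mp hv'mem with h | h
        · omega
        · rw [hsplit] at h
          rcases List.mem_append.mp h with h | h
          · exact absurd (hrun v' h) hv
          · exact h
      have hv'gt : v < v' := hgt v' hv'r
      have hwr : w ∈ rest.dropWhile (fun x => x == v) := by
        rcases List.mem_cons.mp hw with h | h
        · omega
        · rw [hsplit] at h
          rcases List.mem_append.mp h with h | h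
          · have := hrun w h; omega
          · exact h
      have hceq : (rest.dropWhile (fun x => x == v)).count v' = (v :: rest).count v' := by
        have hta : (rest.takeWhile (fun x => x == v)).count v' = 0 :=
          List.count_eq_zero.mpr (fun hmem => hv (hrun v' hmem))
        have hra : rest.count v' =
            (rest.takeWhile (fun x => x == v)).count v' + (rest.dropWhile (fun x => x == v)).count v' := by
          conv_lhs => rw [hsplit]
          exact List.count_append ..
        rw [List.count_cons_of_ne (a := v') (b := v) (fun h => hv h.symm)]
        omega
      exact ⟨v', w, h1, h2, hwr, h3, by rw [hceq]; exact h4⟩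
  · rintro (⟨h1, h2, w0, t, hd, h4⟩ | ⟨v', w, h1, h2, hw, h3, h4⟩)
    · -- the run of v itself is bad
      have hw0 : w0 ∈ rest.dropWhile (fun x => x == v) := by rw [hd]; exact List.mem_cons_self
      refine ⟨v, w0, h1, h2, ?_, hgt w0 hw0, ?_⟩
      · exact List.mem_cons_of_mem _ (by rw [hsplit]; exact List.mem_append_right _ hw0)
      · omega
    · -- a bad pair of the remainder is a bad pair of the whole list
      have hsub : (rest.dropWhile (fun x => x == v)).Sublist (v :: rest) :=
        (List.dropWhile_sublist _).trans (List.sublist_cons_self _ _)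
      have hcle : (rest.dropWhile (fun x => x == v)).count v' ≤ (v :: rest).count v' :=
        hsub.count_le v'
      exact ⟨v', w, h1, h2, hsub.mem hw, h3, by omega⟩

theorem fubiniB_loop_true_iff (n : Int) (s : List Int) :
    s.Pairwise (· ≤ ·) → (fubiniB_loop n s = true ↔ ¬ FubiniBad n s) := by
  induction s using fubiniB_loop.induct n with
  | case1 =>
    intro _
    simp [fubiniB_loop, FubiniBad]
  | case2 v rest run rest' hcond =>
    intro hs
    simp only [run, rest'] at hcond
    rw [fubiniB_loop, if_pos hcond]
    have hbad : FubiniBad n (v :: rest) := by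
      rw [fubiniBad_cons n v rest hs]
      left
      cases hd : rest.dropWhile (fun x => x == v) with
      | nil => rw [hd] at hcond; simp at hcond
      | cons w t =>
        rw [hd] at hcond
        simp only [Bool.and_eq_true, decide_eq_true_eq] at hcond
        exact ⟨hcond.1.1, hcond.1.2, w, t, rfl, hcond.2⟩
    simp [hbad]
  | case3 v rest run rest' hcond ih =>
    intro hs
    simp only [run, rest'] at hcond ih
    obtain ⟨_, _, hrest', _, _⟩ := runSplit v rest hs
    rw [fubiniB_loop, if_neg hcond, ih hrest', fubiniBad_cons n v rest hs]
    have hnl : ¬ (1 ≤ v ∧ v ≤ n ∧ ∃ w t, rest.dropWhile (fun x => x == v) = w :: t ∧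
        w < v + (1 + ((rest.takeWhile (fun x => x == v)).length : Int))) := by
      rintro ⟨h1, h2, w, t, hd, h4⟩
      apply hcond
      rw [hd]
      simp [h1, h2, h4]
    exact not_congr (or_iff_right hnl).symm

theorem portB_true_iff (lst : List Int) :
    is_fubini_ranking_alt lst = true ↔ ¬ FubiniBad (lst.length : Int) lst := by
  unfold is_fubini_ranking_alt
  have hperm : (PySem.List.sorted lst (fun x => x) false).Perm lst :=
    PySem.List.sorted_perm lst (fun x => x) false
  have hpair : (PySem.List.sorted lst (fun x => x) false).Pairwise (· ≤ ·) := by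
    have := PySem.List.sorted_pairwise lst (fun x => x)
    simpa using this
  rw [fubiniB_loop_true_iff _ _ hpair]
  constructor <;> intro h hb <;> apply h <;>
    · obtain ⟨v, w, h1, h2, hw, h3, h4⟩ := hb
      refine ⟨v, w, h1, h2, ?_, h3, ?_⟩
      · first
        | exact hperm.mem_iff.mpr hw
        | exact hperm.mem_iff.mp hw
      · first
        | rwa [hperm.count_eq]
        | rwa [← hperm.count_eq]

theorem is_fubini_ranking_spec : Claim_equal_is_fubini_ranking := by
  intro lst _
  unfold Spec_is_fubini_ranking
  rw [Bool.eq_iff_iff, portA_true_iff, portB_true_iff]
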